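-- pv_equiv track=rewrite | github.com/ddoylez/spoonerism | spoonerism.py | startSyllable
-- ===== SOURCE A (Python) =====
-- vowelPermissive = 'aeiouyAEIOUY'
--
-- vowelStrict = 'aeiouAEIOU'
--
-- def startSyllable(word):
--     # word = word.lower()
--     syl = ''
--     last = ''
--     for i in word:
--         curr = i
--         syl += last
--         if curr not in vowelStrict and last in vowelPermissive and last != '':
--             break
--         last = curr
--     return syl
-- ===== SOURCE B (Python) =====
-- # B: scan adjacent (prev, curr) pairs and return a slice at the first
-- # vowel->non-strict-vowel boundary; no lag variable, no accumulator.
-- vowelPermissive = 'aeiouyAEIOUY'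
--
-- vowelStrict = 'aeiouAEIOU'
--
-- def startSyllable(word):
--     for i, (prev, curr) in enumerate(zip(word, word[1:]), 1):
--         if curr not in vowelStrict and prev in vowelPermissive:
--             return word[:i]
--     return word[:-1]
-- ===== Notes on version B (the rewrite author's own statement) =====
-- stated objective: simpler
-- what changed: Replaces A's lagged accumulator (syl/last state with a break) by a scan over adjacent character pairs that returns a slice word[:i] at the first permissive-vowel/non-strict-vowel boundary, with word[:-1] as the fallback.
import Mathlib
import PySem

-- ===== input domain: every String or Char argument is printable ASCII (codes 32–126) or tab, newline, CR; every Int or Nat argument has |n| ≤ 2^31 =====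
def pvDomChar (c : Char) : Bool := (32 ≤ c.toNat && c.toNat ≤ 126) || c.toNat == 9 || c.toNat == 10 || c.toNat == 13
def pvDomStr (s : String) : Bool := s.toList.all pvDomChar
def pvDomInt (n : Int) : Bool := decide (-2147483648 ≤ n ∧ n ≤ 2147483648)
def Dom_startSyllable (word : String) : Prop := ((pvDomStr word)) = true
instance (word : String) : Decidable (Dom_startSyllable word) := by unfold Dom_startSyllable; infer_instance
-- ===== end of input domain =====

-- B replaces A's lagged-accumulator loop by a pair scan that returns a slice at the
-- first vowel/non-strict-vowel boundary (objective: simpler; same linear cost).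

def pvVowelPermissive : List Char := "aeiouyAEIOUY".toList
def pvVowelStrict : List Char := "aeiouAEIOU".toList

-- ===== PORT A =====
-- loop body of A: syl += last; break on the boundary test; last = curr.
-- 'curr not in vowelStrict' / 'last in vowelPermissive' are Python substring tests
-- on a 1-char / 0-or-1-char string, ported with PySem.Chars.isIn.
def startSyllableGoA : List Char → List Char → List Char → List Char
  | [], syl, _ => syl
  | c :: rest, syl, last =>
    let syl' := syl ++ last
    if !(PySem.Chars.isIn [c] pvVowelStrict) && PySem.Chars.isIn last pvVowelPermissive
        && !last.isEmpty then
      syl'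
    else
      startSyllableGoA rest syl' [c]

def startSyllable (word : String) : String :=
  String.ofList (startSyllableGoA word.toList [] [])

-- ===== PORT B =====
-- Source B: for i, (prev, curr) in enumerate(zip(word, word[1:]), 1): if boundary: return word[:i]
-- the early-returning for/enumerate/zip is this recursion over the zipped pairs.
def startSyllableGoB : List (Char × Char) → Nat → Option Nat
  | [], _ => none
  | (prev, curr) :: rest, i =>
    if !(decide (curr ∈ pvVowelStrict)) && decide (prev ∈ pvVowelPermissive) then some i
    else startSyllableGoB rest (i + 1)

def startSyllable_alt (word : String) : String :=
  let cs := word.toList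
  match startSyllableGoB (cs.zip cs.tail) 1 with
  | some i => String.ofList (PySem.List.slice cs none (some (i : Int)))  -- word[:i]
  | none => String.ofList cs.dropLast                                    -- word[:-1]

-- ===== PRECONDITION & SPEC =====
def Spec_startSyllable (word : String) (out : String) : Prop := out = startSyllable_alt word
instance (word : String) (out : String) : Decidable (Spec_startSyllable word out) := by unfold Spec_startSyllable; infer_instance

-- ===== CLAIM (what is proved, stated in full; the proofs are below) =====
def Claim_equal_startSyllable : Prop := ∀ (word : String), Dom_startSyllable word → Spec_startSyllable word (startSyllable word)

-- ===== LEMMAS AND PROOFS =====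

-- the two boundary tests agree (A tests substrings of 1-char strings, B char membership)
theorem startSyllable_cond_eq (c p : Char) :
    (!(PySem.Chars.isIn [c] pvVowelStrict) && PySem.Chars.isIn [p] pvVowelPermissive
      && !([p] : List Char).isEmpty)
    = (!(decide (c ∈ pvVowelStrict)) && decide (p ∈ pvVowelPermissive)) := by
  have hc : PySem.Chars.isIn [c] pvVowelStrict = decide (c ∈ pvVowelStrict) := by
    by_cases h : c ∈ pvVowelStrict
    · simp [h, PySem.Chars.isIn_iff_infix, List.singleton_infix_iff]
    · simp [h]
      rw [PySem.Chars.isIn_eq_false_iff, List.singleton_infix_iff]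
      exact h
  have hp : PySem.Chars.isIn [p] pvVowelPermissive = decide (p ∈ pvVowelPermissive) := by
    by_cases h : p ∈ pvVowelPermissive
    · simp [h, PySem.Chars.isIn_iff_infix, List.singleton_infix_iff]
    · simp [h]
      rw [PySem.Chars.isIn_eq_false_iff, List.singleton_infix_iff]
      exact h
  simp [hc, hp]

theorem startSyllableGoB_ge : ∀ (ps : List (Char × Char)) (i j : Nat),
    startSyllableGoB ps i = some j → i ≤ j := by
  intro ps
  induction ps with
  | nil => intro i j h; simp [startSyllableGoB] at h
  | cons pc rest ih =>
    intro i j h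
    obtain ⟨prev, curr⟩ := pc
    unfold startSyllableGoB at h
    split_ifs at h with hcond
    · exact Nat.le_of_eq (Option.some.inj h)
    · exact Nat.le_of_succ_le (ih (i + 1) j h)

-- the core invariant: A's run with pending last-char p equals B's pair scan, relative to i
theorem startSyllable_rel : ∀ (cs acc : List Char) (p : Char) (i : Nat),
    startSyllableGoA cs acc [p]
      = match startSyllableGoB ((p :: cs).zip cs) i with
        | some j => acc ++ (p :: cs).take (j - i + 1)
        | none => acc ++ (p :: cs).dropLast := by
  intro cs
  induction cs with
  | nil =>
    intro acc p i
    simp [startSyllableGoA, startSyllableGoB]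
  | cons c rest ih =>
    intro acc p i
    have hzip : (p :: c :: rest).zip (c :: rest) = (p, c) :: (c :: rest).zip rest := rfl
    rw [hzip]
    unfold startSyllableGoA startSyllableGoB
    rw [startSyllable_cond_eq c p]
    by_cases hcond : (!(decide (c ∈ pvVowelStrict)) && decide (p ∈ pvVowelPermissive)) = true
    · simp only [hcond, if_true]
      simp
    · simp only [Bool.not_eq_true] at hcond
      simp only [hcond, Bool.false_eq_true, if_false]
      rw [ih (acc ++ [p]) c (i + 1)]
      cases hB : startSyllableGoB ((c :: rest).zip rest) (i + 1) with
      | none => simp [List.dropLast]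
      | some j =>
        have hj : i + 1 ≤ j := startSyllableGoB_ge _ _ _ hB
        simp only []
        have : j - i + 1 = (j - (i + 1) + 1) + 1 := by omega
        rw [this, List.take_succ_cons, List.append_assoc]
        rfl

-- ===== VERDICT (by name: the statement is the Claim_ definition above) =====
theorem startSyllable_spec : Claim_equal_startSyllable := by
  intro word _
  unfold Spec_startSyllable startSyllable startSyllable_alt
  cases hcs : word.toList with
  | nil => simp [startSyllableGoA, startSyllableGoB]
  | cons c rest =>
    -- A's first iteration has last = '': the break test is false, state becomes ([], [c])
    have hfirst : startSyllableGoA (c :: rest) [] [] = startSyllableGoA rest [] [c] := by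
      simp [startSyllableGoA]
    rw [hfirst, startSyllable_rel rest [] c 1]
    simp only [List.tail_cons]
    cases hB : startSyllableGoB ((c :: rest).zip rest) 1 with
    | none => simp
    | some j =>
      have hj : 1 ≤ j := startSyllableGoB_ge _ _ _ hB
      simp only [PySem.List.slice_to_natCast]
      have : j - 1 + 1 = j := by omega
      rw [this, List.nil_append]
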